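-- pv_equiv track=rewrite | github.com/mxwz/astrbot_plugin_zhanbu | xlr.py | get_dizhi_yinyang
-- ===== SOURCE A (Python) =====
-- def get_dizhi_yinyang(shichen):
--     """根据时辰获取地支阴阳"""
--     ranges = [(1, 3, '阴'), (3, 5, '阳'), (5, 7, '阴'), (7, 9, '阳'),
--               (9, 11, '阴'), (11, 13, '阳'), (13, 15, '阴'), (15, 17, '阳'),
--               (17, 19, '阴'), (19, 21, '阳'), (21, 23, '阴')]
--
--     for start, end, yinyang in ranges:
--         if start <= shichen < end:
--             return yinyang
--     return '阳'
-- ===== SOURCE B (Python) =====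
-- def get_dizhi_yinyang(shichen):
--     """根据时辰获取地支阴阳"""
--     if 1 <= shichen < 23:
--         return '阴' if ((shichen - 1) // 2) % 2 == 0 else '阳'
--     return '阳'
-- ===== Notes on version B (the rewrite author's own statement) =====
-- stated objective: simpler
-- what changed: Replaces the linear scan over a literal range table with a closed-form parity test on the interval index (shichen-1)//2.
import Mathlib
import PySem

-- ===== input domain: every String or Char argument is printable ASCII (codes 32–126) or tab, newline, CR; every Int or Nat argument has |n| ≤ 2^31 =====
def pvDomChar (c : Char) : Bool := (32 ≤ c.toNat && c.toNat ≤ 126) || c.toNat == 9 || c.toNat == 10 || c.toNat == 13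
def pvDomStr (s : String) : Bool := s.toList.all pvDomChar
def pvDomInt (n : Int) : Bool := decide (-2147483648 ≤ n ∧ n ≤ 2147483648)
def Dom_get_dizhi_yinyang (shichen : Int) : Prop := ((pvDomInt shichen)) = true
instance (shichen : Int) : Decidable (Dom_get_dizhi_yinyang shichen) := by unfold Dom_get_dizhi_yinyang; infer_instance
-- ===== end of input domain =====

-- B replaces A's linear scan over an 11-entry range table by a closed-form parity test (objective: simpler).

-- ===== PORT A =====
-- the for-loop over the literal ranges table: first matching half-open interval wins, default '阳'
def pvALoop (n : Int) : List (Int × Int × String) → String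
  | [] => "阳"
  | (s, e, y) :: rest => if s ≤ n ∧ n < e then y else pvALoop n rest

def get_dizhi_yinyang (shichen : Int) : String :=
  pvALoop shichen
    [(1, 3, "阴"), (3, 5, "阳"), (5, 7, "阴"), (7, 9, "阳"),
     (9, 11, "阴"), (11, 13, "阳"), (13, 15, "阴"), (15, 17, "阳"),
     (17, 19, "阴"), (19, 21, "阳"), (21, 23, "阴")]

-- ===== PORT B =====
def get_dizhi_yinyang_alt (shichen : Int) : String :=
  if 1 ≤ shichen ∧ shichen < 23 then
    if PySem.Int.mod (PySem.Int.floordiv (shichen - 1) 2) 2 = 0 then "阴" else "阳"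
  else "阳"

-- ===== PRECONDITION & SPEC =====
def Spec_get_dizhi_yinyang (shichen : Int) (out : String) : Prop := out = get_dizhi_yinyang_alt shichen
instance (shichen : Int) (out : String) : Decidable (Spec_get_dizhi_yinyang shichen out) := by unfold Spec_get_dizhi_yinyang; infer_instance

-- ===== CLAIM (what is proved, stated in full; the proofs are below) =====
def Claim_equal_get_dizhi_yinyang : Prop := ∀ (shichen : Int), Dom_get_dizhi_yinyang shichen → Spec_get_dizhi_yinyang shichen (get_dizhi_yinyang shichen)

-- ===== LEMMAS AND PROOFS =====

-- loop invariant for A's scan: if no table row matches, the loop falls through to the default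
theorem pvALoop_default (n : Int) (l : List (Int × Int × String))
    (h : ∀ p ∈ l, ¬ (p.1 ≤ n ∧ n < p.2.1)) : pvALoop n l = "阳" := by
  induction l with
  | nil => rfl
  | cons p rest ih =>
    obtain ⟨s, e, y⟩ := p
    rw [pvALoop, if_neg (h (s, e, y) (List.mem_cons_self ..))]
    exact ih fun q hq => h q (List.mem_cons_of_mem _ hq)

-- ===== VERDICT (by name: the statement is the Claim_ definition above) =====
theorem get_dizhi_yinyang_spec : Claim_equal_get_dizhi_yinyang := by
  intro n _
  unfold Spec_get_dizhi_yinyang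
  by_cases h : 1 ≤ n ∧ n < 23
  · obtain ⟨h1, h2⟩ := h
    interval_cases n <;> decide
  · rw [get_dizhi_yinyang, get_dizhi_yinyang_alt, if_neg h]
    apply pvALoop_default
    intro p hp
    simp only [List.mem_cons, List.not_mem_nil, or_false] at hp
    rcases hp with h1|h1|h1|h1|h1|h1|h1|h1|h1|h1|h1 <;> subst h1 <;> simp only [] <;> omega
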